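-- pv_equiv track=rewrite | github.com/vrthra/antlr2json | src/ebnftosimple.py | process_CHARSET
-- ===== SOURCE A (Python) =====
-- def process_CHARSET(val, jval, k):
--     #now get everything until the first range
--     v = val.find('-')
--     if v == -1:
--         return process_chars(val, k)
--     else:
--         if v == len(val) -1: # last is not special char
--             return process_chars(val, k)
--         else:
--             first_part = val[:v-1] # v-1 is the start char of range
--             # v + 1 is the end char of range
--             return process_chars(first_part, k) + \
--                     process_range(val[v-1], val[v+1], k) +\
--                     process_CHARSET(val[v+2:], jval, k)
--
-- def process_chars(chars, k):
--     return chars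
--
-- def process_range(a, b, k):
--     return ''.join([chr(c) for c in range(ord(a), ord(b)+1)])
-- ===== SOURCE B (Python) =====
-- def process_CHARSET(val, jval, k):
--     # Two staged passes. Pass 1: the chain of suffixes the rewriting visits,
--     # left to right. Pass 2: build the result back to front, popping the chain.
--     sufs = [val]
--     while True:
--         s = sufs[-1]
--         v = s.find('-')
--         if 0 <= v < len(s) - 1:
--             sufs.append(s[v+2:])
--         else:
--             break
--     res = sufs.pop()
--     while sufs:
--         s = sufs.pop()
--         v = s.find('-')
--         res = s[:v-1] + ''.join(map(chr, range(ord(s[v-1]), ord(s[v+1]) + 1))) + res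
--     return res
-- ===== Notes on version B (the rewrite author's own statement) =====
-- stated objective: alternative
-- what changed: Replaced the top-down recursion (which interleaves scanning and string concatenation) by two staged passes: pass 1 builds the chain of suffixes the rewriting visits, pass 2 pops that chain as a stack and assembles the result back to front.
import Mathlib
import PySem

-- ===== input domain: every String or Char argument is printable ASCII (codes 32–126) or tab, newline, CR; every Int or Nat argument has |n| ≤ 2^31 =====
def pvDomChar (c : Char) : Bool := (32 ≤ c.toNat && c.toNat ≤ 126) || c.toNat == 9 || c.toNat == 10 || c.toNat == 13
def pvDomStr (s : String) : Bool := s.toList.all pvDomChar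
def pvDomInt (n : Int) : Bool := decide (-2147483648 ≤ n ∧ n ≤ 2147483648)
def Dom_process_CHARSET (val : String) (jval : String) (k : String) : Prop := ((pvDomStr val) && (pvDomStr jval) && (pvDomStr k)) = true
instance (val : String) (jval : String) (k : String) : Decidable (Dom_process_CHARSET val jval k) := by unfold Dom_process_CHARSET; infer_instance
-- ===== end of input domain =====

-- B replaces A's top-down recursion by two staged passes: collect the chain of
-- suffixes the rewriting visits, then build the result back to front from a stack
-- (alternative decomposition; same cost).

-- ===== PORT A =====
-- process_range(a, b, k): ''.join([chr(c) for c in range(ord(a), ord(b)+1)])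
-- ord = Char.toNat, chr = Char.ofNat: exact on the ASCII domain (codes 9..126).
def pvRangeA (a b : Char) : List Char :=
  (PySem.List.pyRange (a.toNat : Int) ((b.toNat : Int) + 1) 1).map (fun c => Char.ofNat c.toNat)

-- process_CHARSET, recursion on val (jval is passed through unchanged, k is unused
-- by process_chars/process_range, so they do not appear in the char-level recursion).
def pvA (val : List Char) : List Char :=
  let v := PySem.Chars.find val ['-']
  if v = -1 then val
  else if v = PySem.Chars.len val - 1 then val
  else
    PySem.List.slice val none (some (v - 1)) ++
      pvRangeA (PySem.List.pyGetD val (v - 1) 'a') (PySem.List.pyGetD val (v + 1) 'a') ++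
      pvA (PySem.List.slice val (some (v + 2)) none)
termination_by val.length
decreasing_by
  have hv : 0 ≤ PySem.Chars.find val ['-'] := by
    have hlb := PySem.Chars.neg_one_le_find val ['-']
    omega
  have hinf : ['-'] <:+: val := (PySem.Chars.find_nonneg_iff val ['-']).mp hv
  have hne : val ≠ [] := by
    intro hcontra
    subst hcontra
    simp at hinf
  have hpos : 0 < val.length := List.length_pos_iff.mpr hne
  have hslice : PySem.List.slice val (some (PySem.Chars.find val ['-'] + 2)) none
      = List.drop (PySem.Chars.find val ['-'] + 2).toNat val :=
    PySem.List.slice_from _ (by omega)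
  rw [hslice]
  have hdrop : (List.drop (PySem.Chars.find val ['-'] + 2).toNat val).length
      = val.length - (PySem.Chars.find val ['-'] + 2).toNat :=
    List.length_drop
  rw [hdrop]
  omega

def process_CHARSET (val : String) (jval : String) (k : String) : String :=
  String.ofList (pvA val.toList)

-- ===== PORT B =====
-- pass 1 of Source B: sufs = [val]; while True: s = sufs[-1]; v = s.find('-');
-- if 0 <= v < len(s)-1: sufs.append(s[v+2:]) else: break
-- (the loop appends to the end; the recursion produces that same list head-first)
def pvChain (s : List Char) : List (List Char) :=
  let v := PySem.Chars.find s ['-']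
  if h : 0 ≤ v ∧ v < PySem.Chars.len s - 1 then
    s :: pvChain (PySem.List.slice s (some (v + 2)) none)
  else [s]
termination_by s.length
decreasing_by
  have hsp := (PySem.Chars.find_spec h.1).1.length_le
  rw [PySem.List.slice_from _ (by omega)]
  simp only [List.length_drop, List.length_cons, List.length_nil] at hsp ⊢
  omega

-- one iteration of pass 2 of Source B: s = sufs.pop(); v = s.find('-');
-- res = s[:v-1] + ''.join(map(chr, range(ord(s[v-1]), ord(s[v+1]) + 1))) + res
def pvStep (s : List Char) (res : List Char) : List Char :=
  let v := PySem.Chars.find s ['-']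
  PySem.List.slice s none (some (v - 1)) ++
    (PySem.List.pyRange ((PySem.List.pyGetD s (v - 1) 'a').toNat : Int)
        (((PySem.List.pyGetD s (v + 1) 'a').toNat : Int) + 1) 1).map
      (fun c => Char.ofNat c.toNat) ++ res

-- res = sufs.pop() (the chain is nonempty by construction), then the while-loop
-- pops the remaining entries from the end = a right fold over sufs[:-1]
def process_CHARSET_alt (val : String) (jval : String) (k : String) : String :=
  let sufs := pvChain val.toList
  String.ofList (sufs.dropLast.foldr pvStep (sufs.getLast?.getD []))

-- ===== PRECONDITION & SPEC =====
def Spec_process_CHARSET (val : String) (jval : String) (k : String) (out : String) : Prop := out = process_CHARSET_alt val jval k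
instance (val : String) (jval : String) (k : String) (out : String) : Decidable (Spec_process_CHARSET val jval k out) := by unfold Spec_process_CHARSET; infer_instance

-- ===== CLAIM (what is proved, stated in full; the proofs are below) =====
def Claim_equal_process_CHARSET : Prop := ∀ (val : String) (jval : String) (k : String), Dom_process_CHARSET val jval k → Spec_process_CHARSET val jval k (process_CHARSET val jval k)

-- ===== LEMMAS AND PROOFS =====

theorem pvChain_ne_nil (s : List Char) : pvChain s ≠ [] := by
  rw [pvChain]
  split_ifs <;> simp

-- folding pass 2 over the chain of suffixes reproduces A's recursion
theorem pv_main (s : List Char) :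
    (pvChain s).dropLast.foldr pvStep ((pvChain s).getLast?.getD []) = pvA s := by
  fun_induction pvChain s with
  | case1 s v h ih =>
    obtain ⟨x, xs, hx⟩ := List.exists_cons_of_ne_nil (pvChain_ne_nil (PySem.List.slice s (some (v + 2)) none))
    rw [hx] at ih ⊢
    simp only [List.dropLast_cons₂, List.foldr_cons, List.getLast?_cons_cons]
    rw [ih]
    have hv0 : 0 ≤ PySem.Chars.find s ['-'] := h.1
    have hsp := (PySem.Chars.find_spec hv0).1.length_le
    conv_rhs => rw [pvA]
    rw [if_neg (by omega), if_neg (by omega)]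
    unfold pvStep pvRangeA
    simp only [List.append_assoc]
    rfl
  | case2 s v h =>
    simp only [List.dropLast_singleton, List.getLast?_singleton, Option.getD_some]
    rw [pvA]
    split_ifs with h1 h2
    · rfl
    · rfl
    · -- ¬(0 ≤ v ∧ v < len - 1) with v ≠ -1 and v ≠ len - 1 is impossible
      exfalso
      have hvlb := PySem.Chars.neg_one_le_find s ['-']
      have hv0 : 0 ≤ PySem.Chars.find s ['-'] := by omega
      have hsp := (PySem.Chars.find_spec hv0).1.length_le
      simp only [List.length_drop, List.length_cons, List.length_nil] at hsp
      have hlen : PySem.Chars.len s = (s.length : Int) := by simp [PySem.Chars.len_eq]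
      rw [hlen] at h h2
      have ht := Int.toNat_of_nonneg hv0
      omega

-- ===== VERDICT (by name: the statement is the Claim_ definition above) =====
theorem process_CHARSET_spec : Claim_equal_process_CHARSET := by
  intro val jval k _
  show process_CHARSET val jval k = process_CHARSET_alt val jval k
  unfold process_CHARSET process_CHARSET_alt
  simp only []
  rw [pv_main]
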